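-- pv_equiv track=rewrite | github.com/ZeT3R/AT-backend | app_project/test_packages/second_test_helper.py | Sheffer
-- ===== SOURCE A (Python) =====
-- def Sheffer(Tdnf):
--     Tdnf = list(Tdnf)  # переводим в список
--     Tdnf = ["/" if x == "&" or x == "v" else x for x in Tdnf]  # меняем на чёрточку все знаки
--     for i, val in enumerate(Tdnf):  # пробегаемся по значениям
--         if val == "n":  # встретили н
--             x_save = ''.join(Tdnf[i + 1]) + Tdnf[i + 2]  # записали икс с цифрой
--             del Tdnf[i:i + 2]  # удалили н и икс с цифрой
--             Tdnf[i] = '(' + x_save + " / " + x_save + ')'  # Собрали строчку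
--     Tdnf = ''.join(Tdnf)  # преобразовали в строку
--     return Tdnf  # вернули
-- ===== SOURCE B (Python) =====
-- def Sheffer(Tdnf):
--     t = ["/" if x == "&" or x == "v" else x for x in Tdnf]
--     out = []
--     i = 0
--     while i < len(t):
--         if t[i] == "n":
--             c1, c2 = t[i + 1], t[i + 2]  # IndexError if the 'n' is truncated, as in A
--             out.append("(" + c1 + c2 + " / " + c1 + c2 + ")")
--             i += 3
--         else:
--             out.append(t[i])
--             i += 1
--     return "".join(out)
-- ===== Notes on version B (the rewrite author's own statement) =====
-- stated objective: alternative
-- what changed: Replaces the in-place del-under-enumerate mutation of the list with a single forward index pass that builds a new output list and joins it once; it trades A's in-place splicing for an append-only accumulator.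
import Mathlib
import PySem

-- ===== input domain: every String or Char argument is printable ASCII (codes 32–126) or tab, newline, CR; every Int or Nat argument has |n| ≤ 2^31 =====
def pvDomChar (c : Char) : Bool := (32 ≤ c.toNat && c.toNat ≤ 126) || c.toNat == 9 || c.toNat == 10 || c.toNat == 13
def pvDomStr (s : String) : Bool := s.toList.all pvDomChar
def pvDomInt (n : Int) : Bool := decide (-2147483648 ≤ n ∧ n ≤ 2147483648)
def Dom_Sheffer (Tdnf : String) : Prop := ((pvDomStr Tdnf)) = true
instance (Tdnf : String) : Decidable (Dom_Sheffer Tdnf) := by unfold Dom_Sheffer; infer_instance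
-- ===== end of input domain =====

-- B replaces A's in-place del-under-enumerate mutation with a single forward pass that
-- builds a new output list (alternative traversal; return value only, A rebinds its local).

-- a Python 1-character string
def chrS (c : Char) : String := String.ofList [c]

-- ===== PORT A =====
-- A's `for i, val in enumerate(Tdnf)` over the list it mutates: i is the index into the CURRENT list state l.
def shefferLoopA (l : List String) (i : Nat) : List String :=
  if h : i < l.length then
    if l.getD i "" = "n" then
      let x_save : String := l.getD (i + 1) "" ++ l.getD (i + 2) ""  -- IndexError outside Pre_
      let l' : List String := l.take i ++ l.drop (i + 2)             -- del Tdnf[i:i+2]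
      let l'' : List String := l'.set i ("(" ++ x_save ++ " / " ++ x_save ++ ")")
      shefferLoopA l'' (i + 1)
    else
      shefferLoopA l (i + 1)
  else l
termination_by l.length - i
decreasing_by
  · simp only [List.length_set, List.length_append, List.length_take, List.length_drop]; omega
  · omega

def Sheffer (Tdnf : String) : String :=
  let l : List String := Tdnf.toList.map (fun x => if x = '&' ∨ x = 'v' then "/" else chrS x)
  String.join (shefferLoopA l 0)

-- ===== PORT B =====
-- B's forward pass: index i over the fixed translated char list, accumulating the output list.
def shefferLoopB (t : List Char) (i : Nat) (out : List String) : List String :=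
  if h : i < t.length then
    if t.getD i ' ' = 'n' then
      let c1 : String := chrS (t.getD (i + 1) ' ')  -- IndexError outside Pre_
      let c2 : String := chrS (t.getD (i + 2) ' ')
      shefferLoopB t (i + 3) (out ++ ["(" ++ (c1 ++ c2) ++ " / " ++ (c1 ++ c2) ++ ")"])
    else
      shefferLoopB t (i + 1) (out ++ [chrS (t.getD i ' ')])
  else out
termination_by t.length - i

def Sheffer_alt (Tdnf : String) : String :=
  let t : List Char := Tdnf.toList.map (fun x => if x = '&' ∨ x = 'v' then '/' else x)
  String.join (shefferLoopB t 0 [])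

-- ===== PRECONDITION & SPEC =====
-- Pre_ excludes exactly the inputs where the left-to-right 3-token scan meets an 'n' with fewer than
-- two following characters: there Python A raises IndexError (and so does B).
def shefferOk : List Char → Bool
  | [] => true
  | c :: rest =>
    if c = 'n' then
      match rest with
      | _ :: _ :: rest' => shefferOk rest'
      | _ => false
    else shefferOk rest

def Pre_Sheffer (Tdnf : String) : Prop := shefferOk Tdnf.toList = true
instance (Tdnf : String) : Decidable (Pre_Sheffer Tdnf) := by unfold Pre_Sheffer; infer_instance

def pvWitness_Sheffer : String := "nx1&x2"

def Spec_Sheffer (Tdnf : String) (out : String) : Prop := out = Sheffer_alt Tdnf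
instance (Tdnf : String) (out : String) : Decidable (Spec_Sheffer Tdnf out) := by unfold Spec_Sheffer; infer_instance

-- ===== CLAIM (what is proved, stated in full; the proofs are below) =====
def Claim_equal_Sheffer : Prop := ∀ (Tdnf : String), Dom_Sheffer Tdnf → Pre_Sheffer Tdnf → Spec_Sheffer Tdnf (Sheffer Tdnf)

-- ===== LEMMAS AND PROOFS =====

-- the pure skip-3 transform both loops compute on the translated character list
def shefferNorm : List Char → List String
  | [] => []
  | c :: rest =>
    if c = 'n' then
      match rest with
      | a :: b :: rest' =>
        ("(" ++ (chrS a ++ chrS b) ++ " / " ++ (chrS a ++ chrS b) ++ ")") :: shefferNorm rest'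
      | _ => []
    else chrS c :: shefferNorm rest

lemma shefferOk_cons_ne {c : Char} (r : List Char) (hc : c ≠ 'n') :
    shefferOk (c :: r) = shefferOk r := by
  rw [shefferOk.eq_def]; simp [hc]

lemma shefferNorm_cons_ne {c : Char} (r : List Char) (hc : c ≠ 'n') :
    shefferNorm (c :: r) = chrS c :: shefferNorm r := by
  rw [shefferNorm.eq_def]; simp [hc]

-- B's translation of one character
def trB (x : Char) : Char := if x = '&' ∨ x = 'v' then '/' else x

lemma trB_eq_n (x : Char) : trB x = 'n' ↔ x = 'n' := by
  unfold trB; split_ifs with h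
  · constructor
    · intro hq; exact absurd hq (by decide)
    · intro hq; subst hq; rcases h with h | h <;> simp at h
  · exact Iff.rfl

lemma chrS_ne_n {c : Char} (hc : c ≠ 'n') : chrS c ≠ "n" := by
  intro hq
  exact hc (by have := congrArg String.toList hq; simpa [chrS] using this)

lemma shefferOk_map_trB (l : List Char) : shefferOk (l.map trB) = shefferOk l := by
  induction l using shefferOk.induct with
  | case1 => rfl
  | case2 a b rest' ih =>
    have hn : trB 'n' = 'n' := by decide
    simp only [List.map_cons, hn]
    show shefferOk (List.map trB rest') = shefferOk rest'
    exact ih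
  | case3 rest hshort =>
    have hn : trB 'n' = 'n' := by decide
    cases rest with
    | nil => simp [shefferOk, hn]
    | cons a r =>
      cases r with
      | nil => simp [shefferOk, hn]
      | cons b r' => exact absurd rfl (hshort a b r')
  | case4 c rest hc ih =>
    have hc' : ¬ trB c = 'n' := fun hq => hc ((trB_eq_n c).mp hq)
    simp only [List.map_cons, shefferOk_cons_ne _ hc', shefferOk_cons_ne _ hc, ih]

-- A's loop invariant: the processed prefix `done` is stable, the tail is the still-unprocessed chars.
lemma loopA_invariant (cs : List Char) (done : List String) (h : shefferOk cs = true) :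
    shefferLoopA (done ++ cs.map chrS) done.length = done ++ shefferNorm cs := by
  induction cs using shefferOk.induct generalizing done with
  | case1 =>
    rw [shefferLoopA]
    simp [shefferNorm]
  | case2 a b rest' ih =>
    have h' : shefferOk rest' = true := by simpa [shefferOk] using h
    rw [shefferLoopA]
    have hlt : done.length < (done ++ ('n' :: a :: b :: rest').map chrS).length := by simp
    rw [dif_pos hlt]
    have hget0 : (done ++ ('n' :: a :: b :: rest').map chrS).getD done.length "" = chrS 'n' := by
      simp [List.getD]
    have hget1 : (done ++ ('n' :: a :: b :: rest').map chrS).getD (done.length + 1) "" = chrS a := by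
      simp only [List.getD]
      rw [List.getElem?_append_right (by omega)]; simp
    have hget2 : (done ++ ('n' :: a :: b :: rest').map chrS).getD (done.length + 2) "" = chrS b := by
      simp only [List.getD]
      rw [List.getElem?_append_right (by omega)]; simp
    have hn : chrS 'n' = "n" := rfl
    rw [hn] at hget0
    have htake : (done ++ ('n' :: a :: b :: rest').map chrS).take done.length = done :=
      List.take_left
    have hdrop : (done ++ ('n' :: a :: b :: rest').map chrS).drop (done.length + 2)
        = chrS b :: rest'.map chrS := by
      rw [List.drop_length_add_append]; rfl
    have hset : (done ++ chrS b :: rest'.map chrS).set done.length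
          ("(" ++ (chrS a ++ chrS b) ++ " / " ++ (chrS a ++ chrS b) ++ ")")
        = (done ++ ["(" ++ (chrS a ++ chrS b) ++ " / " ++ (chrS a ++ chrS b) ++ ")"])
          ++ rest'.map chrS := by
      simp
    simp only [hget0, hget1, hget2, htake, hdrop, reduceIte, hset]
    have hlen : done.length + 1
        = (done ++ ["(" ++ (chrS a ++ chrS b) ++ " / " ++ (chrS a ++ chrS b) ++ ")"]).length := by
      simp
    rw [hlen, ih _ h']
    simp [shefferNorm]
  | case3 rest hshort =>
    exfalso
    cases rest with
    | nil => simp [shefferOk] at h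
    | cons a r =>
      cases r with
      | nil => simp [shefferOk] at h
      | cons b r' => exact hshort a b r' rfl
  | case4 c rest hc ih =>
    have h' : shefferOk rest = true := by rwa [shefferOk_cons_ne _ hc] at h
    rw [shefferLoopA]
    have hlt : done.length < (done ++ (c :: rest).map chrS).length := by simp
    rw [dif_pos hlt]
    have hget0 : (done ++ (c :: rest).map chrS).getD done.length "" = chrS c := by
      simp [List.getD]
    simp only [hget0, if_neg (chrS_ne_n hc)]
    have hlen : done.length + 1 = (done ++ [chrS c]).length := by simp
    have hl : done ++ (c :: rest).map chrS = (done ++ [chrS c]) ++ rest.map chrS := by simp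
    rw [hl, hlen, ih _ h', shefferNorm_cons_ne _ hc]
    simp

-- B's loop invariant: the remaining suffix of the fixed list drives the recursion.
lemma loopB_invariant (t : List Char) (cs : List Char) (h : shefferOk cs = true) :
    ∀ (i : Nat) (out : List String), t.drop i = cs →
      shefferLoopB t i out = out ++ shefferNorm cs := by
  induction cs using shefferOk.induct with
  | case1 =>
    intro i out hdrop
    rw [shefferLoopB, dif_neg (by have := List.drop_eq_nil_iff.mp hdrop; omega)]
    simp [shefferNorm]
  | case2 a b rest' ih =>
    intro i out hdrop
    have h' : shefferOk rest' = true := by simpa [shefferOk] using h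
    have hlt : i < t.length := by
      by_contra hge
      rw [List.drop_eq_nil_iff.mpr (by omega)] at hdrop; exact absurd hdrop (by simp)
    have hk : ∀ k : Nat, t[i + k]? = ('n' :: a :: b :: rest')[k]? := by
      intro k; rw [← List.getElem?_drop, hdrop]
    have hget0 : t.getD i ' ' = 'n' := by
      simp only [List.getD]; rw [show i = i + 0 by omega, hk 0]; rfl
    have hget1 : t.getD (i + 1) ' ' = a := by
      simp only [List.getD]; rw [hk 1]; rfl
    have hget2 : t.getD (i + 2) ' ' = b := by
      simp only [List.getD]; rw [hk 2]; rfl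
    rw [shefferLoopB, dif_pos hlt, hget0, if_pos rfl, hget1, hget2]
    have hdrop3 : t.drop (i + 3) = rest' := by
      have : (t.drop i).drop 3 = t.drop (i + 3) := List.drop_drop
      rw [← this, hdrop]; rfl
    rw [ih h' (i + 3) _ hdrop3]
    simp [shefferNorm]
  | case3 rest hshort =>
    exfalso
    cases rest with
    | nil => simp [shefferOk] at h
    | cons x r =>
      cases r with
      | nil => simp [shefferOk] at h
      | cons y r' => exact hshort x y r' rfl
  | case4 c rest hc ih =>
    intro i out hdrop
    have h' : shefferOk rest = true := by rwa [shefferOk_cons_ne _ hc] at h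
    have hlt : i < t.length := by
      by_contra hge
      rw [List.drop_eq_nil_iff.mpr (by omega)] at hdrop; exact absurd hdrop (by simp)
    have hget0 : t.getD i ' ' = c := by
      simp only [List.getD]
      rw [show i = i + 0 by omega, ← List.getElem?_drop, hdrop]; rfl
    have hdrop1 : t.drop (i + 1) = rest := by
      have : (t.drop i).drop 1 = t.drop (i + 1) := List.drop_drop
      rw [← this, hdrop]; rfl
    rw [shefferLoopB, dif_pos hlt, hget0, if_neg hc, ih h' (i + 1) _ hdrop1,
      shefferNorm_cons_ne _ hc]
    simp

lemma mapA_eq (cs : List Char) :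
    cs.map (fun x => if x = '&' ∨ x = 'v' then "/" else chrS x) = (cs.map trB).map chrS := by
  rw [List.map_map]
  apply List.map_congr_left
  intro x _
  by_cases hx : x = '&' ∨ x = 'v' <;> simp [Function.comp, trB, hx, chrS]

theorem Sheffer_spec : Claim_equal_Sheffer := by
  intro Tdnf _ hpre
  unfold Spec_Sheffer
  simp only [Sheffer, Sheffer_alt]
  have hok : shefferOk (Tdnf.toList.map trB) = true := by
    rw [shefferOk_map_trB]; exact hpre
  have hA := loopA_invariant (Tdnf.toList.map trB) [] hok
  have hB := loopB_invariant (Tdnf.toList.map trB) (Tdnf.toList.map trB) hok 0 [] rfl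
  simp only [List.nil_append, List.length_nil] at hA hB
  rw [mapA_eq, hA]
  have : (Tdnf.toList.map fun x => if x = '&' ∨ x = 'v' then '/' else x) = Tdnf.toList.map trB := rfl
  rw [this, hB]
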